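-- pv_equiv track=rewrite | github.com/RMCV-Rajapaksha/Competitive-Programing-New | Haxtream 2024/Magical stones with Super Powers.py | count_powerful_stones
-- ===== SOURCE A (Python) =====
-- def count_powerful_stones(states):
--     freq = {}
--     for state in states:
--         freq[state] = freq.get(state, 0) + 1
--     powerful_stones = 0
--     for count in freq.values():
--         if count > 1:
--             powerful_stones += 1
--     return powerful_stones
-- ===== SOURCE B (Python) =====
-- def count_powerful_stones(states):
--     seen = set()
--     duplicates = set()
--     for state in states:
--         if state in seen:
--             duplicates.add(state)
--         else:
--             seen.add(state)
--     return len(duplicates)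
-- ===== Notes on version B (the rewrite author's own statement) =====
-- stated objective: simpler
-- what changed: Replaces the frequency dict plus a second pass over its values with a single pass keeping two sets (seen / duplicates) and returning the duplicate set's size.
import Mathlib
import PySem

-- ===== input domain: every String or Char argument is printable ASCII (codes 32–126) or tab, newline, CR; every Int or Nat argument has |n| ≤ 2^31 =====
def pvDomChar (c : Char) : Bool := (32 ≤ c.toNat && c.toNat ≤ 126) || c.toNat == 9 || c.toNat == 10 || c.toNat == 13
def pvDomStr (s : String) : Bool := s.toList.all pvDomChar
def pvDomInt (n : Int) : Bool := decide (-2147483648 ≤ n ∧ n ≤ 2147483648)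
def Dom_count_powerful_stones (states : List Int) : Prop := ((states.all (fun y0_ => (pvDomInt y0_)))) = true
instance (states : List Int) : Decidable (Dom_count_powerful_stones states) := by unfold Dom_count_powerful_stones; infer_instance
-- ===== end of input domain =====

-- B replaces A's frequency dict + second value-scan by one pass over the list keeping two sets
-- (seen / duplicates) and returning the duplicate set's size; same O(n) cost, simpler.


-- ===== PORT A =====
def count_powerful_stones (states : List Int) : Int :=
  let freq : PySem.Dict Int Int :=
    states.foldl (fun d state => d.insert state (d.getD state 0 + 1)) PySem.Dict.empty
  (PySem.Dict.values freq).foldl (fun powerful_stones count =>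
    if count > 1 then powerful_stones + 1 else powerful_stones) 0

-- ===== PORT B =====
def count_powerful_stones_alt (states : List Int) : Int :=
  let final :=
    states.foldl (fun (p : PySem.Set Int × PySem.Set Int) state =>
      if state ∈ p.1 then (p.1, PySem.Set.add p.2 state)
      else (PySem.Set.add p.1 state, p.2)) (PySem.Set.empty, PySem.Set.empty)
  (PySem.Set.len final.2 : Int)

-- ===== PRECONDITION & SPEC =====
def Spec_count_powerful_stones (states : List Int) (out : Int) : Prop := out = count_powerful_stones_alt states
instance (states : List Int) (out : Int) : Decidable (Spec_count_powerful_stones states out) := by unfold Spec_count_powerful_stones; infer_instance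

-- ===== CLAIM (what is proved, stated in full; the proofs are below) =====
def Claim_equal_count_powerful_stones : Prop := ∀ (states : List Int), Dom_count_powerful_stones states → Spec_count_powerful_stones states (count_powerful_stones states)

-- ===== LEMMAS AND PROOFS =====

-- Invariant of B's single pass: starting from (seen, dups), the final duplicate set contains
-- exactly the old dups plus every y of l that was already seen or occurs at least twice in l;
-- and it stays Nodup.
theorem alt_loop_inv (l : List Int) (seen dups : PySem.Set Int)
    (hs : seen.Nodup) (hd : dups.Nodup) :
    let r := l.foldl (fun (p : PySem.Set Int × PySem.Set Int) state =>
      if state ∈ p.1 then (p.1, PySem.Set.add p.2 state)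
      else (PySem.Set.add p.1 state, p.2)) (seen, dups)
    (∀ y, y ∈ r.2 ↔ y ∈ dups ∨ (y ∈ l ∧ (y ∈ seen ∨ 2 ≤ l.count y))) ∧ r.2.Nodup := by
  induction l generalizing seen dups with
  | nil => exact ⟨fun y => by simp, hd⟩
  | cons x t ih =>
    simp only [List.foldl_cons]
    by_cases hx : x ∈ seen
    · simp only [if_pos hx]
      obtain ⟨hmem, hnd⟩ := ih seen (dups.add x) hs (PySem.Set.nodup_add dups x hd)
      refine ⟨fun y => ?_, hnd⟩
      rw [hmem y, PySem.Set.mem_add]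
      by_cases hyx : y = x
      · subst hyx; simp [hx]
      · rw [List.count_cons_of_ne (fun h => hyx h.symm)]
        simp [hyx, List.mem_cons]
    · simp only [if_neg hx]
      obtain ⟨hmem, hnd⟩ := ih (seen.add x) dups (PySem.Set.nodup_add seen x hs) hd
      refine ⟨fun y => ?_, hnd⟩
      rw [hmem y, PySem.Set.mem_add]
      have hpos : y ∈ t ↔ 0 < t.count y := List.count_pos_iff.symm
      by_cases hyx : y = x
      · subst hyx
        simp only [hpos, List.mem_cons, List.count_cons_self, hx, false_or, true_or, and_true,
          or_true, true_and]
        constructor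
        · rintro (h | h)
          · exact Or.inl h
          · exact Or.inr (by omega)
        · rintro (h | h)
          · exact Or.inl h
          · exact Or.inr (by omega)
      · rw [List.count_cons_of_ne (fun h => hyx h.symm)]
        simp [hyx, List.mem_cons]

-- ===== VERDICT (by name: the statement is the Claim_ definition above) =====
theorem count_powerful_stones_spec : Claim_equal_count_powerful_stones := by
  intro states _
  show count_powerful_stones states = count_powerful_stones_alt states
  -- A's value: the number of distinct elements of `states` occurring more than once
  have hv : PySem.Dict.values (PySem.Dict.counter states)
      = ((PySem.Set.ofList states).map (fun k => ((states.count k : Nat) : Int))) := by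
    simp only [PySem.Dict.values, PySem.Dict.items_counter, List.map_map]
    rfl
  have hA : count_powerful_stones states
      = (((PySem.Set.ofList states).filter
            (fun k => decide ((1 : Int) < (states.count k : Int)))).length : Int) := by
    unfold count_powerful_stones
    simp only [PySem.Dict.foldl_insert_getD_add_one_eq_counter, hv]
    rw [show (fun (acc c : Int) => if c > 1 then acc + 1 else acc)
        = (fun acc c => if (fun c : Int => decide (1 < c)) c = true then acc + 1 else acc) from by
      funext a c; simp]
    rw [PySem.List.foldl_count_if (fun c : Int => decide (1 < c)), List.countP_map,
      ← List.countP_eq_length_filter]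
    simp only [zero_add, Nat.cast_inj]
    exact List.countP_congr fun k _ => by simp [Function.comp]
  -- B's value: the length of the duplicate set, Nodup with the same membership
  obtain ⟨hmem, hnd⟩ := alt_loop_inv states PySem.Set.empty PySem.Set.empty
    List.nodup_nil List.nodup_nil
  have hperm : ((PySem.Set.ofList states).filter
        (fun k => decide ((1 : Int) < (states.count k : Int)))).Perm
      (states.foldl (fun (p : PySem.Set Int × PySem.Set Int) state =>
        if state ∈ p.1 then (p.1, PySem.Set.add p.2 state)
        else (PySem.Set.add p.1 state, p.2)) (PySem.Set.empty, PySem.Set.empty)).2 := by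
    refine (List.perm_ext_iff_of_nodup
      (List.Nodup.filter _ (PySem.Set.nodup_ofList states)) hnd).mpr fun y => ?_
    rw [List.mem_filter, PySem.Set.mem_ofList, hmem y]
    simp only [PySem.Set.empty, List.not_mem_nil, false_or, decide_eq_true_eq]
    constructor
    · rintro ⟨hy, hc⟩; exact ⟨hy, by omega⟩
    · rintro ⟨hy, hc⟩; exact ⟨hy, by omega⟩
  unfold count_powerful_stones_alt
  rw [hA]
  simp only [PySem.Set.len, hperm.length_eq]
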